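-- pv_equiv track=rewrite | github.com/niquefa/extract-pairs-that-sum-x | analyzer/analyzer_utils.py | list_are_equal
-- ===== SOURCE A (Python) =====
-- def list_are_equal(a, b):
--     if a == None and b == None:
--         return True
--     if a == None or b == None:
--         return False
--     if len(a) != len(b):
--         return False
--     return sorted([sorted(x) for x in a]) == sorted([sorted(x) for x in b])
-- ===== SOURCE B (Python) =====
-- from collections import Counter
--
--
-- def list_are_equal(a, b):
--     if a is None or b is None:
--         return a is None and b is None
--     remaining = list(b)
--     for x in a:
--         cx = Counter(x)
--         for i, y in enumerate(remaining):
--             if Counter(y) == cx: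
--                 del remaining[i]
--                 break
--         else:
--             return False
--     return not remaining
-- ===== Notes on version B (the rewrite author's own statement) =====
-- stated objective: alternative
-- what changed: B replaces A's canonicalize-by-sorting + outer-sort comparison with a sort-free greedy elimination: for each inner list of a it searches the remaining lists of b for a Counter-equal (multiset-equal) one and deletes it, succeeding iff everything is matched and nothing remains.
import Mathlib
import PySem

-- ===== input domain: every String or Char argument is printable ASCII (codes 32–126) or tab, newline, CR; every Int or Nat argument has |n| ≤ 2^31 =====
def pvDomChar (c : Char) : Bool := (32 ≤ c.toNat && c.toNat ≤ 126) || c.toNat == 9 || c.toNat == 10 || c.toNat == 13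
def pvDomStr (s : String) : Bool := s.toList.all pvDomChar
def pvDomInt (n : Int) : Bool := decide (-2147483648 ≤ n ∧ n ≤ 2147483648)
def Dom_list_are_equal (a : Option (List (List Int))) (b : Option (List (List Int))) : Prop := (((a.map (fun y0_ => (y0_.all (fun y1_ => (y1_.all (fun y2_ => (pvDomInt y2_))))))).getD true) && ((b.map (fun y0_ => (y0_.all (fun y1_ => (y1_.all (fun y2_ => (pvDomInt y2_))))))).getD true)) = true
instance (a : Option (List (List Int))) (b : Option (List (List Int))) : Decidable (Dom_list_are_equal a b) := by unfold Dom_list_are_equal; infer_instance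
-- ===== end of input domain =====

-- B replaces A's sort-and-compare by a sort-free greedy elimination: each inner list
-- of a is matched against (and deleted from) a working copy of b by Counter equality.

-- ===== PORT A =====
def list_are_equal (a : Option (List (List Int))) (b : Option (List (List Int))) : Bool :=
  match a, b with
  | none, none => true
  | none, some _ => false
  | some _, none => false
  | some xs, some ys =>
    if xs.length ≠ ys.length then false
    else decide (@PySem.List.sorted (List Int) (List Int) List.instLinearOrder.toLT LinearOrder.toDecidableLT
                   (xs.map (fun x => PySem.List.sorted x (fun v => v) false)) (fun v => v) false
               = @PySem.List.sorted (List Int) (List Int) List.instLinearOrder.toLT LinearOrder.toDecidableLT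
                   (ys.map (fun x => PySem.List.sorted x (fun v => v) false)) (fun v => v) false)

-- ===== PORT B =====
-- Counter(y) == cx : Python dict equality (same keys, same counts, order ignored)
def pvCntEq (y x : List Int) : Bool :=
  let dy := PySem.Dict.counter y
  let dx := PySem.Dict.counter x
  dy.keys.all (fun k => dy.getD k 0 == dx.getD k 0) &&
    dx.keys.all (fun k => dx.getD k 0 == dy.getD k 0)

-- the inner 'for i, y in enumerate(remaining): if Counter(y)==cx: del remaining[i]; break / else: None'
def pvRemoveFirst (x : List Int) : List (List Int) → Option (List (List Int))
  | [] => none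
  | y :: ys => if pvCntEq y x then some ys else (pvRemoveFirst x ys).map (y :: ·)

-- the outer 'for x in a: … else: return False' loop, then 'return not remaining'
def pvMatchAll : List (List Int) → List (List Int) → Bool
  | [], rem => rem.isEmpty
  | x :: xs, rem =>
    match pvRemoveFirst x rem with
    | none => false
    | some rem' => pvMatchAll xs rem'

def list_are_equal_alt (a : Option (List (List Int))) (b : Option (List (List Int))) : Bool :=
  match a, b with
  | none, none => true
  | none, some _ => false
  | some _, none => false
  | some xs, some ys => pvMatchAll xs ys

-- ===== PRECONDITION & SPEC =====
def Spec_list_are_equal (a : Option (List (List Int))) (b : Option (List (List Int))) (out : Bool) : Prop := out = list_are_equal_alt a b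
instance (a : Option (List (List Int))) (b : Option (List (List Int))) (out : Bool) : Decidable (Spec_list_are_equal a b out) := by unfold Spec_list_are_equal; infer_instance

-- ===== CLAIM (what is proved, stated in full; the proofs are below) =====
def Claim_equal_list_are_equal : Prop := ∀ (a : Option (List (List Int))) (b : Option (List (List Int))), Dom_list_are_equal a b → Spec_list_are_equal a b (list_are_equal a b)

-- ===== LEMMAS AND PROOFS =====

-- canonical form used to reason about both sides
def pvCanon (x : List Int) : List Int := PySem.List.sorted x (fun v => v) false

-- Counter equality is exactly permutation of the inner lists
theorem cntEq_iff (y x : List Int) : pvCntEq y x = true ↔ y.Perm x := by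
  simp only [pvCntEq, Bool.and_eq_true, List.all_eq_true,
    PySem.Dict.keys_counter, PySem.Set.mem_ofList, PySem.Dict.getD_counter,
    beq_iff_eq, Nat.cast_inj, List.perm_iff_count]
  constructor
  · rintro ⟨h1, h2⟩ k
    by_cases hy : k ∈ y
    · exact h1 k hy
    · by_cases hx : k ∈ x
      · exact (h2 k hx).symm
      · rw [List.count_eq_zero_of_not_mem hy, List.count_eq_zero_of_not_mem hx]
  · intro hp
    exact ⟨fun k _ => hp k, fun k _ => (hp k).symm⟩

theorem canon_eq_iff (y x : List Int) : pvCanon y = pvCanon x ↔ y.Perm x :=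
  PySem.List.sorted_id_eq_sorted_id_iff_perm y x

theorem removeFirst_none (x : List Int) (rem : List (List Int))
    (h : pvRemoveFirst x rem = none) : pvCanon x ∉ rem.map pvCanon := by
  induction rem with
  | nil => simp
  | cons y ys ih =>
    by_cases hc : pvCntEq y x = true
    · simp [pvRemoveFirst, hc] at h
    · cases hrf : pvRemoveFirst x ys with
      | some ys' => simp [pvRemoveFirst, hc, hrf] at h
      | none =>
        simp only [List.map_cons, List.mem_cons, not_or]
        exact ⟨fun he => hc ((cntEq_iff y x).mpr ((canon_eq_iff y x).mp he.symm)),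
          ih hrf⟩

theorem removeFirst_some (x : List Int) (rem rem' : List (List Int))
    (h : pvRemoveFirst x rem = some rem') :
    pvCanon x ∈ rem.map pvCanon ∧ rem'.map pvCanon = (rem.map pvCanon).erase (pvCanon x) := by
  induction rem generalizing rem' with
  | nil => cases h
  | cons y ys ih =>
    by_cases hc : pvCntEq y x = true
    · simp only [pvRemoveFirst, if_pos hc] at h
      cases h
      have he : pvCanon y = pvCanon x := (canon_eq_iff y x).mpr ((cntEq_iff y x).mp hc)
      simp [he]
    · cases hrf : pvRemoveFirst x ys with
      | none => simp [pvRemoveFirst, hc, hrf] at h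
      | some ys' =>
        simp only [pvRemoveFirst, if_neg hc, hrf, Option.map_some, Option.some.injEq] at h
        subst h
        rcases ih ys' hrf with ⟨hmem, herase⟩
        have hne : pvCanon y ≠ pvCanon x :=
          fun he => hc ((cntEq_iff y x).mpr ((canon_eq_iff y x).mp he))
        refine ⟨by simp [hmem], ?_⟩
        simp only [List.map_cons, List.erase_cons]
        rw [if_neg (by simpa using hne), herase]

theorem matchAll_iff (xs rem : List (List Int)) :
    pvMatchAll xs rem = true ↔ (xs.map pvCanon).Perm (rem.map pvCanon) := by
  induction xs generalizing rem with
  | nil =>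
    simp only [pvMatchAll, List.isEmpty_iff, List.map_nil]
    constructor
    · rintro rfl; simp
    · intro h; simpa using List.nil_perm.mp h
  | cons x xs ih =>
    simp only [pvMatchAll]
    cases hrf : pvRemoveFirst x rem with
    | none =>
      simp only [Bool.false_eq_true, false_iff, List.map_cons]
      intro hp
      exact removeFirst_none x rem hrf (hp.mem_iff.mp (List.mem_cons_self))
    | some rem' =>
      rcases removeFirst_some x rem rem' hrf with ⟨hmem, herase⟩
      rw [ih rem', List.map_cons, List.cons_perm_iff_perm_erase, herase]
      exact (iff_of_eq rfl).trans ⟨fun h => ⟨hmem, h⟩, fun h => h.2⟩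

-- A's side: length guard + outer sort equality ⟺ permutation of canonical forms
theorem a_some_eq (xs ys : List (List Int)) :
    list_are_equal (some xs) (some ys)
      = decide ((xs.map pvCanon).Perm (ys.map pvCanon)) := by
  rw [Bool.eq_iff_iff]
  simp only [list_are_equal, ne_eq]
  split_ifs with hl
  · simp only [decide_eq_true_eq]
    exact PySem.List.sorted_id_eq_sorted_id_iff_perm (xs.map pvCanon) (ys.map pvCanon)
  · exact iff_of_false (by simp)
      (fun hp => hl (by simpa using (of_decide_eq_true hp).length_eq))

-- ===== VERDICT (by name: the statement is the Claim_ definition above) =====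
theorem list_are_equal_spec : Claim_equal_list_are_equal := by
  intro a b _
  unfold Spec_list_are_equal
  match a, b with
  | none, none => rfl
  | none, some _ => rfl
  | some _, none => rfl
  | some xs, some ys =>
    rw [a_some_eq]
    simp only [list_are_equal_alt]
    rw [Bool.eq_iff_iff, decide_eq_true_eq, ← matchAll_iff xs ys]
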